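-- pv_equiv track=rewrite | github.com/kuzin2006/codewars | roboscript_1.py | highlight
-- ===== SOURCE A (Python) =====
-- from itertools import groupby
--
-- def highlight(code):
--     codes = {
--         'R': 'green',
--         'F': 'pink',
--         'L': 'red'
--     }
--
--     grouped_code = [(key, len(list(item))) for key, item in groupby(code)]
--     number, result = '', ''
--     for symbol, length in grouped_code:
--         if symbol.isalpha():
--             if number:
--                 result += '<span style="color: orange">{}</span>'.format(number)
--                 number = ''
--             result += '<span style="color: {}">{}</span>'.format(codes[symbol], symbol*length)
--         elif symbol.isnumeric():
--             number += symbol*length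
--         else:
--             if number:
--                 result += '<span style="color: orange">{}</span>'.format(number)
--                 number = ''
--             result += symbol*length
--     # last char
--     if number:
--         result += '<span style="color: orange">{}</span>'.format(number)
--
--     return result
-- ===== SOURCE B (Python) =====
-- def highlight(code):
--     codes = {'R': 'green', 'F': 'pink', 'L': 'red'}
--     # tokenize: whole numeric runs, same-letter runs, single other chars
--     tokens = []
--     i, n = 0, len(code)
--     while i < n:
--         c = code[i]
--         j = i + 1
--         if c.isnumeric():
--             while j < n and code[j].isnumeric():
--                 j += 1
--             tokens.append(('num', code[i:j]))
--         elif c.isalpha():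
--             while j < n and code[j] == c:
--                 j += 1
--             tokens.append(('cmd', code[i:j]))
--         else:
--             tokens.append(('raw', c))
--         i = j
--     # format pass
--     out = []
--     for kind, text in tokens:
--         if kind == 'num':
--             out.append('<span style="color: orange">{}</span>'.format(text))
--         elif kind == 'cmd':
--             out.append('<span style="color: {}">{}</span>'.format(codes[text[0]], text))
--         else:
--             out.append(text)
--     return ''.join(out)
-- ===== Notes on version B (the rewrite author's own statement) =====
-- stated objective: alternative
-- what changed: Replaces A's groupby plus number-accumulator/flush state machine by a tokenize-then-format pipeline: one pass grabs whole numeric runs, same-letter runs and single other chars as tokens, a second pass maps each token to its span independently.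
-- outside the precondition, e.g. on highlight('A'): A raises KeyError, B raises KeyError
import Mathlib
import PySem

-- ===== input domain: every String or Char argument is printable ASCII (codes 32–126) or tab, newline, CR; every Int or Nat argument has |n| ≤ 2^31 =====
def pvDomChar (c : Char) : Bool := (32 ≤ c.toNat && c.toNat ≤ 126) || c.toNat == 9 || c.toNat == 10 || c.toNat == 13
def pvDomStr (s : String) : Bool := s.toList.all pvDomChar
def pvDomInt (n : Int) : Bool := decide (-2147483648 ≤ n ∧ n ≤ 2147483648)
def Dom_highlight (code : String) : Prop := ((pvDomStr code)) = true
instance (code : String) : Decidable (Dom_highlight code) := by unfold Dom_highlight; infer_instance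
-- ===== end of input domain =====

-- B replaces A's groupby + number-accumulator/flush state machine by a tokenize-then-format
-- pipeline (objective: alternative decomposition, same cost). Both ports build the result as a
-- List Char and wrap it with String.ofList once at the end.

-- ===== PORT A =====
-- the codes dict (shared literal table of both Pythons)
def pvCodes : PySem.Dict Char String :=
  PySem.Dict.ofList [('R', "green"), ('F', "pink"), ('L', "red")]
-- '<span style="color: orange">{}</span>'.format(s)
def pvOrange (s : List Char) : List Char :=
  "<span style=\"color: orange\">".toList ++ s ++ "</span>".toList
-- '<span style="color: {}">{}</span>'.format(col, s)
def pvColor (col : String) (s : List Char) : List Char :=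
  "<span style=\"color: ".toList ++ col.toList ++ "\">".toList ++ s ++ "</span>".toList

-- [(key, len(list(item))) for key, item in groupby(code)]
def pvGroupby : List Char → List (Char × Nat)
  | [] => []
  | c :: t =>
    (c, 1 + (t.takeWhile (· == c)).length) :: pvGroupby (t.dropWhile (· == c))
termination_by l => l.length
decreasing_by simpa using Nat.lt_succ_of_le (t.length_dropWhile_le (· == c))

-- A's for-loop over grouped_code with state (number, result); codes[symbol] raises KeyError
-- outside Pre_ (ported as getD with an unused default)
def pvLoopA : List (Char × Nat) → List Char → List Char → List Char
  | [], number, result => if number ≠ [] then result ++ pvOrange number else result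
  | (symbol, length) :: rest, number, result =>
    if PySem.Chars.isalpha symbol then
      pvLoopA rest []
        ((if number ≠ [] then result ++ pvOrange number else result) ++
          pvColor (pvCodes.getD symbol "") (List.replicate length symbol))
    else if PySem.Chars.isdigit symbol then
      pvLoopA rest (number ++ List.replicate length symbol) result
    else
      pvLoopA rest []
        ((if number ≠ [] then result ++ pvOrange number else result) ++
          List.replicate length symbol)

def highlight (code : String) : String :=
  String.ofList (pvLoopA (pvGroupby code.toList) [] [])

-- ===== PORT B =====
def pvCodesB : PySem.Dict Char String :=
  PySem.Dict.ofList [('R', "green"), ('F', "pink"), ('L', "red")]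
def pvOrangeB (s : List Char) : List Char :=
  "<span style=\"color: orange\">".toList ++ s ++ "</span>".toList
def pvColorB (col : String) (s : List Char) : List Char :=
  "<span style=\"color: ".toList ++ col.toList ++ "\">".toList ++ s ++ "</span>".toList

inductive PvTok : Type
  | num : List Char → PvTok   -- a maximal numeric run
  | cmd : List Char → PvTok   -- a maximal same-letter run
  | raw : Char → PvTok        -- any other single char
deriving DecidableEq, Repr

-- pass 1: the tokenizer (B's while-loop)
def pvTokenize : List Char → List PvTok
  | [] => []
  | c :: t =>
    if PySem.Chars.isdigit c then
      .num (c :: t.takeWhile PySem.Chars.isdigit) :: pvTokenize (t.dropWhile PySem.Chars.isdigit)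
    else if PySem.Chars.isalpha c then
      .cmd (c :: t.takeWhile (· == c)) :: pvTokenize (t.dropWhile (· == c))
    else
      .raw c :: pvTokenize t
termination_by l => l.length
decreasing_by
  · simpa using Nat.lt_succ_of_le (t.length_dropWhile_le PySem.Chars.isdigit)
  · simpa using Nat.lt_succ_of_le (t.length_dropWhile_le (· == c))
  · simp

-- pass 2: format one token (codes[text[0]] is the same getD as in port A)
def pvRender : PvTok → List Char
  | .num s => pvOrangeB s
  | .cmd [] => []                                 -- unreachable: cmd runs are nonempty
  | .cmd (c :: s) => pvColorB (pvCodesB.getD c "") (c :: s)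
  | .raw c => [c]

-- ''.join(out)
def pvRenderAll : List PvTok → List Char
  | [] => []
  | t :: ts => pvRender t ++ pvRenderAll ts

def highlight_alt (code : String) : String :=
  String.ofList (pvRenderAll (pvTokenize code.toList))

-- ===== PRECONDITION & SPEC =====
-- Pre_ excludes strings containing a letter other than R, F, L: there A raises KeyError.
def Pre_highlight (code : String) : Prop :=
  code.toList.all (fun c => !PySem.Chars.isalpha c || (c == 'R' || c == 'F' || c == 'L')) = true
instance (code : String) : Decidable (Pre_highlight code) := by unfold Pre_highlight; infer_instance
def pvWitness_highlight : String := "F3R"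

def Spec_highlight (code : String) (out : String) : Prop := out = highlight_alt code
instance (code : String) (out : String) : Decidable (Spec_highlight code out) := by
  unfold Spec_highlight; infer_instance

-- ===== CLAIM (what is proved, stated in full; the proofs are below) =====
def Claim_equal_highlight : Prop :=
  ∀ (code : String), Dom_highlight code → Pre_highlight code → Spec_highlight code (highlight code)

-- ===== LEMMAS AND PROOFS =====

theorem pvOrangeB_eq : pvOrangeB = pvOrange := rfl
theorem pvColorB_eq : pvColorB = pvColor := rfl
theorem pvCodesB_eq : pvCodesB = pvCodes := rfl

-- what A's loop still owes given pending number `num` and remaining input `l`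
def pvPend (num : List Char) (l : List Char) : List Char :=
  match l with
  | [] => if num ≠ [] then pvOrange num else []
  | c :: _ =>
    if PySem.Chars.isdigit c then
      pvOrange (num ++ l.takeWhile PySem.Chars.isdigit) ++
        pvRenderAll (pvTokenize (l.dropWhile PySem.Chars.isdigit))
    else
      (if num ≠ [] then pvOrange num else []) ++ pvRenderAll (pvTokenize l)

theorem pv_alpha_not_digit (c : Char) (h : PySem.Chars.isalpha c = true) :
    PySem.Chars.isdigit c = false := by
  by_contra hc
  rw [Bool.not_eq_false] at hc
  simp only [PySem.Chars.isdigit, Bool.and_eq_true, decide_eq_true_eq] at hc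
  simp only [PySem.Chars.isalpha, PySem.Chars.isupper, PySem.Chars.islower, Bool.or_eq_true,
    Bool.and_eq_true, decide_eq_true_eq] at h
  rcases h with ⟨h1, _⟩ | ⟨h1, _⟩
  · exact absurd (le_trans h1 hc.2) (by decide)
  · exact absurd (le_trans h1 hc.2) (by decide)

theorem pv_takeWhile_eq_replicate (c : Char) :
    ∀ t : List Char, t.takeWhile (· == c) = List.replicate (t.takeWhile (· == c)).length c := by
  intro t
  induction t with
  | nil => simp
  | cons d t ih =>
    by_cases h : d = c
    · subst h; simpa [List.takeWhile_cons, List.replicate_succ] using ih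
    · simp [ h]

-- splitting a takeWhile/dropWhile at a coarser run (q implies p)
theorem pv_takeWhile_split (p q : Char → Bool) (h : ∀ x, q x = true → p x = true) :
    ∀ l : List Char, l.takeWhile p = l.takeWhile q ++ (l.dropWhile q).takeWhile p := by
  intro l
  induction l with
  | nil => simp
  | cons c t ih =>
    by_cases hq : q c = true
    · simp [  hq, h c hq, ih]
    · simp [List.takeWhile_cons,  hq]

theorem pv_dropWhile_split (p q : Char → Bool) (h : ∀ x, q x = true → p x = true) :
    ∀ l : List Char, l.dropWhile p = (l.dropWhile q).dropWhile p := by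
  intro l
  induction l with
  | nil => simp
  | cons c t ih =>
    by_cases hq : q c = true
    · simp [ hq, h c hq, ih]
    · simp [List.dropWhile_cons, hq]

-- a run of a non-letter non-digit char is rendered char by char by B
theorem pv_raw_run (c : Char) (hd : PySem.Chars.isdigit c = false)
    (ha : PySem.Chars.isalpha c = false) :
    ∀ t : List Char, pvRenderAll (pvTokenize (c :: t)) =
      (c :: t.takeWhile (· == c)) ++ pvRenderAll (pvTokenize (t.dropWhile (· == c))) := by
  intro t
  induction t with
  | nil => simp [pvTokenize, hd, ha, pvRenderAll, pvRender]
  | cons d t ih =>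
    by_cases h : d = c
    · subst h
      rw [show pvRenderAll (pvTokenize (d :: d :: t)) = [d] ++ pvRenderAll (pvTokenize (d :: t))
            from by simp [pvTokenize, hd, ha, pvRenderAll, pvRender], ih]
      simp [ ]
    · simp [pvTokenize, hd, ha, pvRenderAll, pvRender,   h]

theorem pv_pend_nil_num (l : List Char) : pvPend [] l = pvRenderAll (pvTokenize l) := by
  match l with
  | [] => simp [pvPend, pvRenderAll, pvTokenize]
  | c :: t =>
    by_cases hd : PySem.Chars.isdigit c = true
    · simp [pvPend, hd, pvTokenize, pvRenderAll, pvRender, pvOrangeB_eq]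
    · simp [pvPend, hd]

theorem pv_main : ∀ (n : Nat) (l : List Char), l.length ≤ n → ∀ (num res : List Char),
    pvLoopA (pvGroupby l) num res = res ++ pvPend num l := by
  intro n
  induction n with
  | zero =>
    intro l hl num res
    rw [List.length_eq_zero_iff.mp (Nat.le_zero.mp hl)]
    simp [pvGroupby, pvLoopA, pvPend]
    by_cases h : num = [] <;> simp [h]
  | succ n ih =>
    intro l hl num res
    match l with
    | [] =>
      simp [pvGroupby, pvLoopA, pvPend]
      by_cases h : num = [] <;> simp [h]
    | c :: t =>
      have hlen : (t.dropWhile (· == c)).length ≤ n :=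
        le_trans (t.length_dropWhile_le (· == c)) (Nat.le_of_succ_le_succ hl)
      have hrun : c :: t.takeWhile (· == c) =
          List.replicate (1 + (t.takeWhile (· == c)).length) c := by
        rw [Nat.add_comm, List.replicate_succ]
        exact congrArg (c :: ·) (pv_takeWhile_eq_replicate c t)
      rw [pvGroupby]
      by_cases ha : PySem.Chars.isalpha c = true
      · have hd := pv_alpha_not_digit c ha
        rw [pvLoopA]
        simp only [ha, if_true]
        rw [ih _ hlen, pv_pend_nil_num]
        have htok : pvRenderAll (pvTokenize (c :: t)) =
            pvColorB (pvCodesB.getD c "") (c :: t.takeWhile (· == c)) ++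
              pvRenderAll (pvTokenize (t.dropWhile (· == c))) := by
          simp [pvTokenize, hd, ha, pvRenderAll, pvRender]
        rw [pvPend]
        simp only [hd, Bool.false_eq_true, if_false, htok, ← hrun]
        by_cases h : num = [] <;> simp [h, pvColorB_eq, pvCodesB_eq]
      · by_cases hd : PySem.Chars.isdigit c = true
        · -- digit run: accumulates into number
          rw [pvLoopA]
          simp only [ha, Bool.false_eq_true, if_false, hd, if_true]
          rw [ih _ hlen]
          have himp : ∀ x : Char, (x == c) = true → PySem.Chars.isdigit x = true := by
            intro x hx; rw [eq_of_beq hx]; exact hd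
          have htw := pv_takeWhile_split PySem.Chars.isdigit (· == c) himp t
          have hdw := pv_dropWhile_split PySem.Chars.isdigit (· == c) himp t
          have hne : num ++ List.replicate (1 + (t.takeWhile (· == c)).length) c ≠ [] := by
            simp [List.replicate_succ, Nat.add_comm 1]
          match hrest : t.dropWhile (· == c) with
          | [] =>
            rw [hrest] at htw hdw
            simp [pvPend, hd, htw, hdw,  ← hrun, pvTokenize, pvRenderAll]
          | d :: t' =>
            rw [hrest] at htw hdw
            by_cases hdd : PySem.Chars.isdigit d = true
            · simp [pvPend, hd, hdd, htw, hdw, ← hrun]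
            · simp [pvPend, hd, hdd, htw, hdw,  ← hrun]
        · -- other char: flushed raw
          have hd' : PySem.Chars.isdigit c = false := by simpa using hd
          have ha' : PySem.Chars.isalpha c = false := by simpa using ha
          rw [pvLoopA]
          simp only [ha', Bool.false_eq_true, if_false, hd']
          rw [ih _ hlen, pv_pend_nil_num]
          rw [pvPend]
          simp only [hd', Bool.false_eq_true, if_false]
          rw [pv_raw_run c hd' ha' t]
          simp only [← hrun]
          by_cases h : num = [] <;> simp [h]

-- ===== VERDICT (by name: the statement is the Claim_ definition above) =====
theorem highlight_spec : Claim_equal_highlight := by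
  intro code _ _
  unfold Spec_highlight highlight highlight_alt
  rw [pv_main code.toList.length code.toList le_rfl, pv_pend_nil_num]
  simp
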